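-- pv_equiv track=rewrite | github.com/alfphaderp/db-code-jam-2019-solutions | inefficient_campus_directions.py | inefficientCampusDirections
-- ===== SOURCE A (Python) =====
-- def inefficientCampusDirections(n, directions):
--     x, y = 0, 0
--     for d in directions:
--         if d == "N":
--             y += 1
--         elif d == "S":
--             y -= 1
--         elif d == "E":
--             x += 1
--         elif d == "W":
--             x -= 1
--
--     return abs(x) + abs(y)
-- ===== SOURCE B (Python) =====
-- def inefficientCampusDirections(n, directions):
--     DELTA = {"N": (0, 1), "S": (0, -1), "E": (1, 0), "W": (-1, 0)}
--
--     def net(lo, hi):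
--         # divide-and-conquer net displacement of directions[lo:hi]
--         if hi - lo == 0:
--             return (0, 0)
--         if hi - lo == 1:
--             return DELTA.get(directions[lo], (0, 0))
--         mid = (lo + hi) // 2
--         ax, ay = net(lo, mid)
--         bx, by = net(mid, hi)
--         return (ax + bx, ay + by)
--
--     x, y = net(0, len(directions))
--     return abs(x) + abs(y)
-- ===== Notes on version B (the rewrite author's own statement) =====
-- stated objective: alternative
-- what changed: Replaced the single left-to-right branching accumulator loop with a divide-and-conquer recursion over index ranges: each step is looked up in a direction->vector table, halves are combined by vector addition, and the Manhattan norm of the net displacement is taken at the end.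
import Mathlib
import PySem

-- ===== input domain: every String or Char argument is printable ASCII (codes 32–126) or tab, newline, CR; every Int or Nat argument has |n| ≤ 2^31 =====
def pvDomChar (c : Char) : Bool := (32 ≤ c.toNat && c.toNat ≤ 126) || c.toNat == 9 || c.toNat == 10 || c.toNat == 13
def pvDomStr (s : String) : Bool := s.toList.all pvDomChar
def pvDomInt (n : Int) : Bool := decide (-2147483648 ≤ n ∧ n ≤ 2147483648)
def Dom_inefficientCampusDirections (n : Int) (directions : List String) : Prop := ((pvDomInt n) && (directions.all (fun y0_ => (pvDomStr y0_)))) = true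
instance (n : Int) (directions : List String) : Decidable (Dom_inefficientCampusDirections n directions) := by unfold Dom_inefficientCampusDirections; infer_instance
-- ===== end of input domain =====

-- ===== PORT A =====
-- B replaces A's single branching accumulator loop by a divide-and-conquer recursion
-- over index ranges with a direction->vector table; objective: alternative (same cost).
def inefficientCampusDirections (n : Int) (directions : List String) : Int :=
  let p := directions.foldl (fun (st : Int × Int) d =>
    if d = "N" then (st.1, st.2 + 1)
    else if d = "S" then (st.1, st.2 - 1)
    else if d = "E" then (st.1 + 1, st.2)
    else if d = "W" then (st.1 - 1, st.2)
    else st) (0, 0)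
  |p.1| + |p.2|

-- ===== PORT B =====
-- the DELTA table of Source B
def icdDELTA : PySem.Dict String (Int × Int) :=
  PySem.Dict.ofList [("N", (0, 1)), ("S", (0, -1)), ("E", (1, 0)), ("W", (-1, 0))]

-- Source B's inner recursive `net(lo, hi)`: net displacement of directions[lo:hi]
def icdNet (directions : List String) (lo hi : Nat) : Int × Int :=
  if _h0 : hi - lo = 0 then (0, 0)
  else if _h1 : hi - lo = 1 then icdDELTA.getD (directions.getD lo "") (0, 0)
  else
    let mid := (lo + hi) / 2
    let a := icdNet directions lo mid
    let b := icdNet directions mid hi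
    (a.1 + b.1, a.2 + b.2)
termination_by hi - lo
decreasing_by all_goals omega

def inefficientCampusDirections_alt (n : Int) (directions : List String) : Int :=
  let p := icdNet directions 0 directions.length
  |p.1| + |p.2|

-- ===== PRECONDITION & SPEC =====
def Spec_inefficientCampusDirections (n : Int) (directions : List String) (out : Int) : Prop := out = inefficientCampusDirections_alt n directions
instance (n : Int) (directions : List String) (out : Int) : Decidable (Spec_inefficientCampusDirections n directions out) := by unfold Spec_inefficientCampusDirections; infer_instance

-- ===== CLAIM (what is proved, stated in full; the proofs are below) =====
def Claim_equal_inefficientCampusDirections : Prop := ∀ (n : Int) (directions : List String), Dom_inefficientCampusDirections n directions → Spec_inefficientCampusDirections n directions (inefficientCampusDirections n directions)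

-- ===== LEMMAS AND PROOFS =====

-- per-step displacement vector, as B's table lookup computes it
def icdDelta (d : String) : Int × Int := icdDELTA.getD d (0, 0)

lemma icdDelta_N : icdDelta "N" = (0, 1) := by decide
lemma icdDelta_S : icdDelta "S" = (0, -1) := by decide
lemma icdDelta_E : icdDelta "E" = (1, 0) := by decide
lemma icdDelta_W : icdDelta "W" = (-1, 0) := by decide

lemma icdDelta_other (d : String) (h1 : d ≠ "N") (h2 : d ≠ "S") (h3 : d ≠ "E") (h4 : d ≠ "W") :
    icdDelta d = (0, 0) := by
  simp [icdDelta, icdDELTA, PySem.Dict.getD_eq_get?_getD, PySem.Dict.ofList,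
        PySem.Dict.update, PySem.Dict.get?_insert, PySem.Dict.get?_empty,
        h1, h2, h3, h4]

-- sequential sum of per-step vectors (proof-side characterisation of both programs)
def icdVecSum (l : List String) : Int × Int :=
  l.foldl (fun p d => (p.1 + (icdDelta d).1, p.2 + (icdDelta d).2)) (0, 0)

lemma icdVecSum_loop (l : List String) (x y : Int) :
    l.foldl (fun p d => (p.1 + (icdDelta d).1, p.2 + (icdDelta d).2)) (x, y)
      = (x + (icdVecSum l).1, y + (icdVecSum l).2) := by
  induction l generalizing x y with
  | nil => simp [icdVecSum]
  | cons d t ih =>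
    simp only [icdVecSum, List.foldl_cons] at *
    rw [ih, ih ((0:Int) + (icdDelta d).1) ((0:Int) + (icdDelta d).2)]
    simp [Prod.ext_iff]
    constructor <;> ring

lemma icdVecSum_append (a b : List String) :
    icdVecSum (a ++ b)
      = ((icdVecSum a).1 + (icdVecSum b).1, (icdVecSum a).2 + (icdVecSum b).2) := by
  have h : icdVecSum (a ++ b)
      = b.foldl (fun p d => (p.1 + (icdDelta d).1, p.2 + (icdDelta d).2))
          ((icdVecSum a).1, (icdVecSum a).2) := by
    simp [icdVecSum, List.foldl_append]
  rw [h, icdVecSum_loop]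

lemma icdNet_eq_vecSum_aux (ds : List String) : ∀ (k lo hi : Nat), hi - lo ≤ k → lo ≤ hi → hi ≤ ds.length →
    icdNet ds lo hi = icdVecSum ((ds.drop lo).take (hi - lo)) := by
  intro k
  induction k with
  | zero =>
    intro lo hi hk hle hlen
    have h0 : hi - lo = 0 := by omega
    rw [icdNet, dif_pos h0, h0]
    simp [icdVecSum]
  | succ k ih =>
    intro lo hi hk hle hlen
    by_cases h0 : hi - lo = 0
    · rw [icdNet, dif_pos h0, h0]
      simp [icdVecSum]
    by_cases h1 : hi - lo = 1
    · have hlo : lo < ds.length := by omega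
      rw [icdNet, dif_neg h0, dif_pos h1, h1]
      have hslice : (ds.drop lo).take 1 = [ds[lo]] := by
        rw [List.drop_eq_getElem_cons hlo]
        rfl
      have hget : ds.getD lo "" = ds[lo] := by
        rw [List.getD_eq_getElem?_getD, List.getElem?_eq_getElem hlo]
        rfl
      rw [hslice, hget]
      simp [icdVecSum, icdDelta]
    · rw [icdNet, dif_neg h0, dif_neg h1]
      show ((icdNet ds lo ((lo + hi) / 2)).1 + (icdNet ds ((lo + hi) / 2) hi).1,
            (icdNet ds lo ((lo + hi) / 2)).2 + (icdNet ds ((lo + hi) / 2) hi).2)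
          = icdVecSum ((ds.drop lo).take (hi - lo))
      have hmid1 : lo ≤ (lo + hi) / 2 := by omega
      have hmid2 : (lo + hi) / 2 ≤ hi := by omega
      rw [ih lo ((lo + hi) / 2) (by omega) hmid1 (by omega),
          ih ((lo + hi) / 2) hi (by omega) hmid2 hlen]
      have hsplit : (ds.drop lo).take (hi - lo)
          = (ds.drop lo).take ((lo + hi) / 2 - lo) ++ (ds.drop ((lo + hi) / 2)).take (hi - (lo + hi) / 2) := by
        have hd : ds.drop ((lo + hi) / 2) = (ds.drop lo).drop ((lo + hi) / 2 - lo) := by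
          rw [List.drop_drop]
          congr 1
          omega
        rw [hd, ← List.take_add]
        congr 1
        omega
      rw [hsplit, icdVecSum_append]

lemma icdNet_eq_vecSum (ds : List String) (lo hi : Nat) (hle : lo ≤ hi) (hlen : hi ≤ ds.length) :
    icdNet ds lo hi = icdVecSum ((ds.drop lo).take (hi - lo)) :=
  icdNet_eq_vecSum_aux ds (hi - lo) lo hi le_rfl hle hlen

-- A's branching step is exactly "add the table vector"
lemma icdStepA_eq (st : Int × Int) (d : String) :
    (if d = "N" then (st.1, st.2 + 1)
     else if d = "S" then (st.1, st.2 - 1)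
     else if d = "E" then (st.1 + 1, st.2)
     else if d = "W" then (st.1 - 1, st.2)
     else st)
      = (st.1 + (icdDelta d).1, st.2 + (icdDelta d).2) := by
  by_cases h1 : d = "N"
  · subst h1; rw [if_pos rfl, icdDelta_N]; simp
  by_cases h2 : d = "S"
  · subst h2; rw [if_neg h1, if_pos rfl, icdDelta_S]; simp [sub_eq_add_neg]
  by_cases h3 : d = "E"
  · subst h3; rw [if_neg h1, if_neg h2, if_pos rfl, icdDelta_E]; simp
  by_cases h4 : d = "W"
  · subst h4; rw [if_neg h1, if_neg h2, if_neg h3, if_pos rfl, icdDelta_W]; simp [sub_eq_add_neg]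
  rw [if_neg h1, if_neg h2, if_neg h3, if_neg h4, icdDelta_other d h1 h2 h3 h4]
  simp

lemma icd_loopA (l : List String) (x y : Int) :
    l.foldl (fun (st : Int × Int) d =>
      if d = "N" then (st.1, st.2 + 1)
      else if d = "S" then (st.1, st.2 - 1)
      else if d = "E" then (st.1 + 1, st.2)
      else if d = "W" then (st.1 - 1, st.2)
      else st) (x, y)
      = (x + (icdVecSum l).1, y + (icdVecSum l).2) := by
  rw [show (fun (st : Int × Int) (d : String) =>
        if d = "N" then (st.1, st.2 + 1)
        else if d = "S" then (st.1, st.2 - 1)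
        else if d = "E" then (st.1 + 1, st.2)
        else if d = "W" then (st.1 - 1, st.2)
        else st)
      = (fun (p : Int × Int) (d : String) => (p.1 + (icdDelta d).1, p.2 + (icdDelta d).2))
      from funext fun st => funext fun d => icdStepA_eq st d]
  exact icdVecSum_loop l x y

-- ===== VERDICT (by name: the statement is the Claim_ definition above) =====
theorem inefficientCampusDirections_spec : Claim_equal_inefficientCampusDirections := by
  intro n ds _
  unfold Spec_inefficientCampusDirections inefficientCampusDirections inefficientCampusDirections_alt
  rw [icd_loopA, icdNet_eq_vecSum ds 0 ds.length (Nat.zero_le _) le_rfl]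
  simp
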